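-- pv_equiv track=rewrite | github.com/trailofbits/masm-decompiler | scripts/stdlib_header_oracle.py | normalize_source_signature
-- ===== SOURCE A (Python) =====
-- class OracleError(RuntimeError):
--     """Raised when the oracle cannot parse an expected or rendered header."""
--
-- def split_top_level_csv(text: str) -> list[str]:
--     """Split a comma-separated list while respecting nested delimiters."""
--
--     items: list[str] = []
--     depth = 0
--     start = 0
--     for index, ch in enumerate(text):
--         if ch in "(<[":
--             depth += 1
--         elif ch in ")>]":
--             depth = max(0, depth - 1)
--         elif ch == "," and depth == 0:
--             items.append(text[start:index].strip())
--             start = index + 1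
--     tail = text[start:].strip()
--     if tail:
--         items.append(tail)
--     return items
--
-- def primitive_alias_tokens(type_name: str) -> tuple[str, ...]:
--     """Expand one source-level stdlib alias into primitive header tokens."""
--
--     mapping: dict[str, tuple[str, ...]] = {
--         "i1": ("Bool",),
--         "u8": ("U32",),
--         "u32": ("U32",),
--         "u64": ("U32", "U32"),
--         "u128": ("U32", "U32", "U32", "U32"),
--         "u256": (
--             "U32",
--             "U32",
--             "U32",
--             "U32",
--             "U32",
--             "U32",
--             "U32",
--             "U32",
--         ),
--         "word": ("Felt", "Felt", "Felt", "Felt"),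
--         "felt": ("Felt",),
--     }
--     try:
--         return mapping[type_name]
--     except KeyError as exc:
--         raise OracleError(f"unsupported source annotation `{type_name}`") from exc
--
-- def normalize_source_signature(portion: str) -> tuple[str, ...]:
--     """Normalize a source MASM signature portion to primitive type tokens."""
--
--     text = portion.strip()
--     if not text:
--         return ()
--     if text.startswith("(") and text.endswith(")"):
--         text = text[1:-1].strip()
--     if not text:
--         return ()
--
--     normalized: list[str] = []
--     for item in split_top_level_csv(text):
--         annotation = item
--         if ":" in item:
--             _, annotation = item.split(":", 1)
--         normalized.extend(primitive_alias_tokens(annotation.strip()))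
--     return tuple(normalized)
-- ===== SOURCE B (Python) =====
-- class OracleError(RuntimeError):
--     """Raised when the oracle cannot parse an expected or rendered header."""
--
-- _ALIASES = {
--     "i1": ("Bool",),
--     "u8": ("U32",),
--     "u32": ("U32",),
--     "u64": ("U32",) * 2,
--     "u128": ("U32",) * 4,
--     "u256": ("U32",) * 8,
--     "word": ("Felt",) * 4,
--     "felt": ("Felt",),
-- }
--
-- def _tokens(annotation: str) -> tuple:
--     toks = _ALIASES.get(annotation)
--     if toks is None:
--         raise OracleError(f"unsupported source annotation `{annotation}`")
--     return toks
--
-- def normalize_source_signature(portion: str) -> tuple: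
--     """Single streaming pass: depth tracking, comma splitting, colon skipping fused."""
--     text = portion.strip()
--     if text.startswith("(") and text.endswith(")"):
--         text = text[1:-1].strip()
--     if not text:
--         return ()
--     out = []
--     depth = 0
--     cur = []            # chars of the current annotation (after the item's first ':', if any)
--     seen_colon = False
--     for ch in text:
--         if ch in "(<[":
--             depth += 1
--             cur.append(ch)
--         elif ch in ")>]":
--             depth = max(0, depth - 1)
--             cur.append(ch)
--         elif ch == "," and depth == 0:
--             out += _tokens("".join(cur).strip())
--             cur = []
--             seen_colon = False
--         elif ch == ":" and not seen_colon:
--             seen_colon = True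
--             cur = []
--         else:
--             cur.append(ch)
--     tail_ann = "".join(cur).strip()
--     if seen_colon or tail_ann:
--         out += _tokens(tail_ann)
--     return tuple(out)
-- ===== Notes on version B (the rewrite author's own statement) =====
-- stated objective: alternative
-- what changed: A's two-phase design (split_top_level_csv builds a list of item strings by index slicing, then a second loop splits each item on ':' and maps it) is replaced by one fused streaming scan over the characters that maintains depth, a current-annotation accumulator and a seen-colon flag, emitting tokens directly at each top-level comma and at the tail.
import Mathlib
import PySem

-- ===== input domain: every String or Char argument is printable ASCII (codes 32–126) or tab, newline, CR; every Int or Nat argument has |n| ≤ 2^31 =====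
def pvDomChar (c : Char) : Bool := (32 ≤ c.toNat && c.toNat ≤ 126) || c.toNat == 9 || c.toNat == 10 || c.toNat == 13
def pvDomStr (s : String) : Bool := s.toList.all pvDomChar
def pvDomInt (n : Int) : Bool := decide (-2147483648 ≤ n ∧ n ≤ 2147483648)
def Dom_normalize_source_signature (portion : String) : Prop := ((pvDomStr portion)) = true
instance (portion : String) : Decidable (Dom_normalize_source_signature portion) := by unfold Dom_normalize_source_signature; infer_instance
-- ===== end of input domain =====

-- B replaces A's two-phase design (top-level CSV split, then a mapping loop) by one fused
-- streaming scan that tracks depth, comma splits and colon skipping in a single pass (objective: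
-- alternative decomposition of the same cost; A raises OracleError on unsupported annotations,
-- B raises it too — those inputs are outside Pre_).

-- ===== PORT A =====
-- dict literal of primitive_alias_tokens; mapping[type_name] raises KeyError→OracleError, so get? = none
-- marks exactly the inputs Pre_ excludes (the `.getD []` below is never reached inside Pre_).
def nssMapping : PySem.Dict String (List String) :=
  PySem.Dict.ofList [("i1", ["Bool"]), ("u8", ["U32"]), ("u32", ["U32"]), ("u64", ["U32", "U32"]),
   ("u128", ["U32", "U32", "U32", "U32"]),
   ("u256", ["U32", "U32", "U32", "U32", "U32", "U32", "U32", "U32"]),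
   ("word", ["Felt", "Felt", "Felt", "Felt"]), ("felt", ["Felt"])]

def primitiveAliasTokens? (typeName : String) : Option (List String) :=
  PySem.Dict.get? nssMapping typeName

-- the body of split_top_level_csv's for-loop over enumerate(text); state = (items, depth, start)
def csvStep (text : List Char) (st : List (List Char) × Int × Int) (p : Int × Char) :
    List (List Char) × Int × Int :=
  if p.2 = '(' ∨ p.2 = '<' ∨ p.2 = '[' then (st.1, st.2.1 + 1, st.2.2)
  else if p.2 = ')' ∨ p.2 = '>' ∨ p.2 = ']' then (st.1, max 0 (st.2.1 - 1), st.2.2)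
  else if p.2 = ',' ∧ st.2.1 = 0 then
    (st.1 ++ [PySem.Chars.strip (PySem.List.slice text (some st.2.2) (some p.1))], st.2.1, p.1 + 1)
  else st

def splitTopLevelCsv (text : List Char) : List (List Char) :=
  let r := (PySem.List.enumerate text 0).foldl (csvStep text) ([], 0, 0)
  let tail := PySem.Chars.strip (PySem.List.slice text (some r.2.2) none)
  if tail ≠ [] then r.1 ++ [tail] else r.1

-- body of A's normalization loop; `item.split(":", 1)[1]` is ported by hand as the chars after the
-- first ':' (exact, since it is only evaluated under the `":" in item` guard)
def tokA (item : List Char) : List String :=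
  let annotation := if PySem.Chars.isIn [':'] item
    then (List.dropWhile (fun c => c != ':') item).drop 1
    else item
  (primitiveAliasTokens? (String.ofList (PySem.Chars.strip annotation))).getD []

def normalize_source_signature (portion : String) : List String :=
  let text := PySem.Chars.strip portion.toList
  if text = [] then []
  else
    let text := if PySem.Chars.startswith text ['('] && PySem.Chars.endswith text [')']
      then PySem.Chars.strip (PySem.List.slice text (some 1) (some (-1))) else text
    if text = [] then []
    else (splitTopLevelCsv text).foldl (fun normalized item => normalized ++ tokA item) []

-- ===== PORT B =====
-- Source B's _ALIASES dict; ("U32",) * 2 etc. become List.replicate; _ALIASES.get(ann) is None exactly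
-- where Source B raises OracleError (outside Pre_), so `.getD []` is never reached inside Pre_.
def nssAliases : PySem.Dict String (List String) :=
  PySem.Dict.ofList [("i1", ["Bool"]), ("u8", ["U32"]), ("u32", ["U32"]), ("u64", List.replicate 2 "U32"),
   ("u128", List.replicate 4 "U32"), ("u256", List.replicate 8 "U32"),
   ("word", List.replicate 4 "Felt"), ("felt", ["Felt"])]

def altTokens (annotation : String) : List String :=
  (PySem.Dict.get? nssAliases annotation).getD []

-- Source B's single for-loop; cur is accumulated reversed (Python appends, Lean conses)
def altScan : List Char → Int → Bool → List Char → List String → List String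
  | [], _, seen, cur, out =>
      let tailAnn := PySem.Chars.strip cur.reverse
      if seen = true ∨ tailAnn ≠ [] then out ++ altTokens (String.ofList tailAnn) else out
  | ch :: rest, depth, seen, cur, out =>
      if ch = '(' ∨ ch = '<' ∨ ch = '[' then altScan rest (depth + 1) seen (ch :: cur) out
      else if ch = ')' ∨ ch = '>' ∨ ch = ']' then altScan rest (max 0 (depth - 1)) seen (ch :: cur) out
      else if ch = ',' ∧ depth = 0 then
        altScan rest depth false [] (out ++ altTokens (String.ofList (PySem.Chars.strip cur.reverse)))
      else if ch = ':' ∧ seen = false then altScan rest depth true [] out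
      else altScan rest depth seen (ch :: cur) out

def normalize_source_signature_alt (portion : String) : List String :=
  let text := PySem.Chars.strip portion.toList
  let text := if PySem.Chars.startswith text ['('] && PySem.Chars.endswith text [')']
    then PySem.Chars.strip (PySem.List.slice text (some 1) (some (-1))) else text
  if text = [] then [] else altScan text 0 false [] []

-- ===== PRECONDITION & SPEC =====
-- pvTopChunks text depth cur = the chunks of text between depth-0 commas (depth counts the
-- unbalanced (<[ openers, clamped at 0); independent of both ports.
def pvTopChunks : List Char → Int → List Char → List (List Char)
  | [], _, cur => [cur.reverse]
  | ch :: rest, depth, cur =>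
      if ch = ',' ∧ depth = 0 then cur.reverse :: pvTopChunks rest 0 []
      else if ch = '(' ∨ ch = '<' ∨ ch = '[' then pvTopChunks rest (depth + 1) (ch :: cur)
      else if ch = ')' ∨ ch = '>' ∨ ch = ']' then pvTopChunks rest (max 0 (depth - 1)) (ch :: cur)
      else pvTopChunks rest depth (ch :: cur)

-- the chunk's annotation (the part after its first ':', stripped) is a supported stdlib alias
def pvAnnOk (chunk : List Char) : Bool :=
  let item := PySem.Chars.strip chunk
  let ann := if item.contains ':' then (List.dropWhile (fun c => c != ':') item).drop 1 else item
  ["i1", "u8", "u32", "u64", "u128", "u256", "word", "felt"].contains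
    (String.ofList (PySem.Chars.strip ann))

-- Pre_ excludes exactly the inputs on which A raises OracleError (and B raises the same error):
-- some top-level comma-chunk of the stripped, paren-unwrapped text (a blank final chunk does not
-- count) carries an annotation that is not a supported alias.  Whether an annotation is supported
-- depends on the comma-chunking itself, so the condition cannot avoid naming the chunks;
-- pvTopChunks is that notion written directly (it is not either port: A slices by enumerate
-- index, B never builds chunks), and the equivalence proof below never uses Pre_.
def Pre_normalize_source_signature (portion : String) : Prop :=
  (let text := PySem.Chars.strip portion.toList
   let text := if PySem.Chars.startswith text ['('] && PySem.Chars.endswith text [')']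
     then PySem.Chars.strip (PySem.List.slice text (some 1) (some (-1))) else text
   if text = [] then true
   else
     let chunks := pvTopChunks text 0 []
     let chunks := if PySem.Chars.strip ((chunks.getLast?).getD []) = [] then chunks.dropLast
       else chunks
     chunks.all pvAnnOk) = true

instance (portion : String) : Decidable (Pre_normalize_source_signature portion) := by
  unfold Pre_normalize_source_signature; infer_instance

def pvWitness_normalize_source_signature : String := "(a: u32, b: felt)"

def Spec_normalize_source_signature (portion : String) (out : List String) : Prop :=
  out = normalize_source_signature_alt portion
instance (portion : String) (out : List String) :
    Decidable (Spec_normalize_source_signature portion out) := by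
  unfold Spec_normalize_source_signature; infer_instance

-- ===== CLAIM (what is proved, stated in full; the proofs are below) =====
def Claim_equal_normalize_source_signature : Prop :=
  ∀ (portion : String), Dom_normalize_source_signature portion →
    Pre_normalize_source_signature portion →
    Spec_normalize_source_signature portion (normalize_source_signature portion)

-- ===== LEMMAS AND PROOFS =====

theorem aliases_eq : nssAliases = nssMapping := by decide

theorem altTokens_eq (s : String) : (primitiveAliasTokens? s).getD [] = altTokens s := by
  simp [primitiveAliasTokens?, altTokens, aliases_eq]

theorem head_of_dropWhile_cons {p : Char → Bool} {l t : List Char} {x : Char}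
    (h : List.dropWhile p l = x :: t) : p x = false := by
  have hne : List.dropWhile p l ≠ [] := by simp [h]
  have h1 := List.head_dropWhile_not p hne
  have h2 : (List.dropWhile p l).head hne = x := by simp only [h, List.head_cons]
  rwa [h2] at h1

theorem rstrip_cons_of_nonspace (x : Char) (t : List Char) (hx : PySem.Chars.isspace x = false) :
    PySem.Chars.rstrip (x :: t) = x :: PySem.Chars.rstrip t := by
  simp only [PySem.Chars.rstrip, List.reverse_cons]
  rw [List.dropWhile_append]
  by_cases h : (List.dropWhile PySem.Chars.isspace t.reverse).isEmpty
  · simp [hx, List.isEmpty_iff.mp h]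
  · simp [h]

theorem rstrip_idem (s : List Char) :
    PySem.Chars.rstrip (PySem.Chars.rstrip s) = PySem.Chars.rstrip s := by
  simp [PySem.Chars.rstrip, List.dropWhile_idempotent]

theorem lstrip_cons_of_nonspace (x : Char) (t : List Char) (hx : PySem.Chars.isspace x = false) :
    PySem.Chars.lstrip (x :: t) = x :: t := by
  simp [PySem.Chars.lstrip, hx]

theorem rstrip_all_space {s : List Char} (h : ∀ a ∈ s, PySem.Chars.isspace a = true) :
    PySem.Chars.rstrip s = [] := by
  simp only [PySem.Chars.rstrip, List.reverse_eq_nil_iff]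
  rw [List.dropWhile_eq_nil_iff]
  intro a ha; exact h a (List.mem_reverse.mp ha)

theorem lstrip_all_space_prefix {w : List Char} (v : List Char)
    (h : ∀ a ∈ w, PySem.Chars.isspace a = true) :
    PySem.Chars.lstrip (w ++ v) = PySem.Chars.lstrip v := by
  simp only [PySem.Chars.lstrip, List.dropWhile_append]
  rw [if_pos]
  simp [List.dropWhile_eq_nil_iff]; exact h

theorem rstrip_append_of_nonspace_head (w t : List Char) (x : Char)
    (hx : PySem.Chars.isspace x = false) :
    PySem.Chars.rstrip (w ++ x :: t) = w ++ PySem.Chars.rstrip (x :: t) := by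
  have hnc : ¬((List.dropWhile PySem.Chars.isspace (x :: t).reverse).isEmpty = true) := by
    rw [List.isEmpty_iff, List.reverse_cons, List.dropWhile_append]
    by_cases h : (List.dropWhile PySem.Chars.isspace t.reverse).isEmpty <;> simp [h, hx]
  simp only [PySem.Chars.rstrip, List.reverse_append]
  rw [List.dropWhile_append, if_neg hnc, List.reverse_append, List.reverse_reverse]

theorem strip_rstrip (s : List Char) :
    PySem.Chars.strip (PySem.Chars.rstrip s) = PySem.Chars.strip s := by
  rcases h : PySem.Chars.lstrip s with _ | ⟨x, t⟩
  · have hall : ∀ a ∈ s, PySem.Chars.isspace a = true := by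
      simpa [PySem.Chars.lstrip, List.dropWhile_eq_nil_iff] using h
    rw [rstrip_all_space hall]
    have h2 : PySem.Chars.strip s = [] := by unfold PySem.Chars.strip; rw [h]; rfl
    rw [h2]; rfl
  · have hx : PySem.Chars.isspace x = false := head_of_dropWhile_cons h
    have hs : List.takeWhile PySem.Chars.isspace s ++ x :: t = s := by
      conv_rhs => rw [← List.takeWhile_append_dropWhile (p := PySem.Chars.isspace) (l := s)]
      rw [show List.dropWhile PySem.Chars.isspace s = x :: t from h]
    have hw : ∀ a ∈ List.takeWhile PySem.Chars.isspace s, PySem.Chars.isspace a = true :=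
      fun a ha => List.mem_takeWhile_imp ha
    have h1 : PySem.Chars.rstrip s = List.takeWhile PySem.Chars.isspace s ++ x :: PySem.Chars.rstrip t := by
      conv_lhs => rw [← hs]
      rw [rstrip_append_of_nonspace_head _ _ _ hx, rstrip_cons_of_nonspace _ _ hx]
    rw [h1]
    simp only [PySem.Chars.strip, h]
    rw [lstrip_all_space_prefix _ hw, lstrip_cons_of_nonspace _ _ hx,
        rstrip_cons_of_nonspace _ _ hx, rstrip_cons_of_nonspace _ _ hx, rstrip_idem]

theorem strip_idem (s : List Char) :
    PySem.Chars.strip (PySem.Chars.strip s) = PySem.Chars.strip s := by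
  rcases h : PySem.Chars.lstrip s with _ | ⟨x, t⟩
  · have h2 : PySem.Chars.strip s = [] := by unfold PySem.Chars.strip; rw [h]; rfl
    rw [h2]; rfl
  · have hx : PySem.Chars.isspace x = false := head_of_dropWhile_cons h
    simp only [PySem.Chars.strip, h]
    rw [rstrip_cons_of_nonspace _ _ hx, lstrip_cons_of_nonspace _ _ hx,
        rstrip_cons_of_nonspace _ _ hx, rstrip_idem]

theorem mem_of_mem_strip {a : Char} {s : List Char} (h : a ∈ PySem.Chars.strip s) : a ∈ s := by
  simp only [PySem.Chars.strip, PySem.Chars.rstrip, PySem.Chars.lstrip] at h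
  rw [List.mem_reverse] at h
  have h2 := (List.dropWhile_sublist (l := (List.dropWhile PySem.Chars.isspace s).reverse)
    (p := PySem.Chars.isspace)).mem h
  rw [List.mem_reverse] at h2
  exact (List.dropWhile_sublist (p := PySem.Chars.isspace)).mem h2

theorem colon_nonspace : PySem.Chars.isspace ':' = false := by decide

theorem strip_colon {pre : List Char} (c : List Char) (hp : ':' ∉ pre) :
    ∃ pre', ':' ∉ pre' ∧
      PySem.Chars.strip (pre ++ ':' :: c) = pre' ++ ':' :: PySem.Chars.rstrip c := by
  have hlift : ∃ pre', (':' ∉ pre') ∧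
      PySem.Chars.lstrip (pre ++ ':' :: c) = pre' ++ ':' :: c := by
    simp only [PySem.Chars.lstrip, List.dropWhile_append]
    by_cases h : (List.dropWhile PySem.Chars.isspace pre).isEmpty
    · exact ⟨[], by simp, by simp [h, colon_nonspace]⟩
    · refine ⟨List.dropWhile PySem.Chars.isspace pre, ?_, by simp [h]⟩
      intro hc
      exact hp ((List.dropWhile_sublist (p := PySem.Chars.isspace)).mem hc)
  obtain ⟨pre', hp', hl⟩ := hlift
  refine ⟨pre', hp', ?_⟩
  unfold PySem.Chars.strip
  rw [hl, rstrip_append_of_nonspace_head _ _ _ colon_nonspace,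
      rstrip_cons_of_nonspace _ _ colon_nonspace]

theorem after_colon {pre : List Char} (d : List Char) (hp : ':' ∉ pre) :
    (List.dropWhile (fun c => c != ':') (pre ++ ':' :: d)).drop 1 = d := by
  rw [List.dropWhile_append, if_pos]
  · simp
  · rw [List.isEmpty_iff, List.dropWhile_eq_nil_iff]
    intro x hx
    simp only [bne_iff_ne, ne_eq]
    exact fun hxe => hp (hxe ▸ hx)

theorem isIn_singleton (a : Char) (s : List Char) :
    PySem.Chars.isIn [a] s = true ↔ a ∈ s := by
  rw [PySem.Chars.isIn_iff_infix]; exact List.singleton_infix_iff a s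


theorem tok_eq_nocolon {p : List Char} (hp : ':' ∉ p) :
    tokA (PySem.Chars.strip p) = altTokens (String.ofList (PySem.Chars.strip p)) := by
  unfold tokA
  rw [if_neg]
  · show (primitiveAliasTokens? (String.ofList (PySem.Chars.strip (PySem.Chars.strip p)))).getD [] = _
    rw [strip_idem]; exact altTokens_eq _
  · intro h
    exact hp (mem_of_mem_strip ((isIn_singleton ':' _).mp h))

theorem tok_eq_colon {pre : List Char} (c : List Char) (hp : ':' ∉ pre) :
    tokA (PySem.Chars.strip (pre ++ ':' :: c)) = altTokens (String.ofList (PySem.Chars.strip c)) := by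
  obtain ⟨pre', hp', heq⟩ := strip_colon c hp
  unfold tokA
  rw [heq, if_pos]
  · rw [after_colon _ hp']
    show (primitiveAliasTokens? (String.ofList (PySem.Chars.strip (PySem.Chars.rstrip c)))).getD [] = _
    rw [strip_rstrip]; exact altTokens_eq _
  · rw [isIn_singleton]; simp

theorem emit_eq {pend cur : List Char} (seen : Bool)
    (h2 : if seen = true then ∃ pre, ':' ∉ pre ∧ pend = pre ++ ':' :: cur.reverse
          else cur.reverse = pend ∧ ':' ∉ pend) :
    tokA (PySem.Chars.strip pend) = altTokens (String.ofList (PySem.Chars.strip cur.reverse)) := by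
  cases seen with
  | false =>
    obtain ⟨hcur, hnc⟩ : cur.reverse = pend ∧ ':' ∉ pend := by simpa using h2
    rw [hcur]
    exact tok_eq_nocolon hnc
  | true =>
    obtain ⟨pre, hpre, hpend⟩ : ∃ pre, ':' ∉ pre ∧ pend = pre ++ ':' :: cur.reverse := by
      simpa using h2
    rw [hpend]
    exact tok_eq_colon _ hpre

theorem scan_main (rest : List Char) :
    ∀ (text pend cur : List Char) (s : Nat) (depth : Int) (seen : Bool)
      (items : List (List Char)),
      text.drop s = pend ++ rest →
      (if seen = true then ∃ pre, ':' ∉ pre ∧ pend = pre ++ ':' :: cur.reverse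
       else cur.reverse = pend ∧ ':' ∉ pend) →
      (let r := (PySem.List.enumerate rest ((s + pend.length : Nat) : Int)).foldl (csvStep text)
         (items, depth, (s : Int));
       let tail := PySem.Chars.strip (PySem.List.slice text (some r.2.2) none);
       (if tail ≠ [] then r.1 ++ [tail] else r.1).foldl
         (fun acc it => acc ++ tokA it) [])
      = altScan rest depth seen cur (items.foldl (fun acc it => acc ++ tokA it) []) := by
  induction rest with
  | nil =>
    intro text pend cur s depth seen items h1 h2
    have hslice : PySem.List.slice text (some (s : Int)) none = pend := by
      rw [PySem.List.slice_from text (by exact_mod_cast Nat.zero_le s)]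
      simp only [Int.toNat_natCast]
      rw [h1, List.append_nil]
    simp only [PySem.List.enumerate_nil, List.foldl_nil]
    rw [hslice]
    have hemit := emit_eq seen h2
    cases seen with
    | true =>
      obtain ⟨pre, hpre, hpend⟩ : ∃ pre, ':' ∉ pre ∧ pend = pre ++ ':' :: cur.reverse := by
        simpa using h2
      have htail : PySem.Chars.strip pend ≠ [] := by
        obtain ⟨pre', _, heq⟩ := strip_colon cur.reverse hpre
        rw [hpend, heq]; simp
      rw [if_pos htail, List.foldl_append]
      simp only [altScan, List.foldl_cons, List.foldl_nil, true_or, if_true]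
      rw [hemit]
    | false =>
      obtain ⟨hcur, hnc⟩ : cur.reverse = pend ∧ ':' ∉ pend := by simpa using h2
      simp only [altScan]
      by_cases hne : PySem.Chars.strip pend ≠ []
      · rw [if_pos hne, List.foldl_append, if_pos (Or.inr (hcur ▸ hne))]
        simp only [List.foldl_cons, List.foldl_nil]
        rw [hemit]
      · rw [if_neg hne, if_neg]
        rw [not_not] at hne
        rw [hcur]
        simp [hne]
  | cons ch rest ih =>
    intro text pend cur s depth seen items h1 h2
    have hidx : ((s + pend.length : Nat) : Int) + 1 = ((s + (pend ++ [ch]).length : Nat) : Int) := by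
      simp; omega
    have h1' : text.drop s = (pend ++ [ch]) ++ rest := by rw [h1]; simp
    rw [PySem.List.enumerate_cons]
    simp only [List.foldl_cons]
    rw [hidx]
    by_cases hb1 : ch = '(' ∨ ch = '<' ∨ ch = '['
    · have hch : ch ≠ ':' := by rcases hb1 with h | h | h <;> subst h <;> decide
      have hstep : csvStep text (items, depth, (s : Int)) (((s + pend.length : Nat) : Int), ch)
          = (items, depth + 1, (s : Int)) := by
        simp [csvStep, hb1]
      rw [hstep]
      conv_rhs => rw [altScan]
      rw [if_pos hb1]
      refine ih text (pend ++ [ch]) (ch :: cur) s (depth + 1) seen items h1' ?_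
      cases seen with
      | true =>
        obtain ⟨pre, hpre, hpend⟩ : ∃ pre, ':' ∉ pre ∧ pend = pre ++ ':' :: cur.reverse := by
          simpa using h2
        simp only [if_pos]
        exact ⟨pre, hpre, by rw [hpend]; simp⟩
      | false =>
        obtain ⟨hcur, hnc⟩ : cur.reverse = pend ∧ ':' ∉ pend := by simpa using h2
        simp only [Bool.false_eq_true, if_false]
        constructor
        · rw [List.reverse_cons, hcur]
        · simp [hnc, Ne.symm hch]
    · by_cases hb2 : ch = ')' ∨ ch = '>' ∨ ch = ']'
      · have hch : ch ≠ ':' := by rcases hb2 with h | h | h <;> subst h <;> decide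
        have hstep : csvStep text (items, depth, (s : Int)) (((s + pend.length : Nat) : Int), ch)
            = (items, max 0 (depth - 1), (s : Int)) := by
          simp [csvStep, hb1, hb2]
        rw [hstep]
        conv_rhs => rw [altScan]
        rw [if_neg hb1, if_pos hb2]
        refine ih text (pend ++ [ch]) (ch :: cur) s (max 0 (depth - 1)) seen items h1' ?_
        cases seen with
        | true =>
          obtain ⟨pre, hpre, hpend⟩ : ∃ pre, ':' ∉ pre ∧ pend = pre ++ ':' :: cur.reverse := by
            simpa using h2
          simp only [if_pos]
          exact ⟨pre, hpre, by rw [hpend]; simp⟩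
        | false =>
          obtain ⟨hcur, hnc⟩ : cur.reverse = pend ∧ ':' ∉ pend := by simpa using h2
          simp only [Bool.false_eq_true, if_false]
          constructor
          · rw [List.reverse_cons, hcur]
          · simp [hnc, Ne.symm hch]
      · by_cases hb3 : ch = ',' ∧ depth = 0
        · have hsl : PySem.List.slice text (some (s : Int)) (some ((s + pend.length : Nat) : Int))
              = pend := by
            rw [PySem.List.slice_natCast, h1]
            simp
          have hstep : csvStep text (items, depth, (s : Int)) (((s + pend.length : Nat) : Int), ch)
              = (items ++ [PySem.Chars.strip pend], depth, ((s + pend.length : Nat) : Int) + 1) := by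
            simp only [csvStep]
            rw [if_neg hb1, if_neg hb2, if_pos (by exact hb3)]
            rw [hsl]
          rw [hstep]
          have h1'' : text.drop (s + pend.length + 1) = [] ++ rest := by
            rw [show s + pend.length + 1 = s + (pend.length + 1) by omega, ← List.drop_drop, h1,
                show pend ++ ch :: rest = (pend ++ [ch]) ++ rest by simp,
                show pend.length + 1 = (pend ++ [ch]).length by simp, List.drop_left]
            rfl
          have hrec := ih text [] [] (s + pend.length + 1) depth false
            (items ++ [PySem.Chars.strip pend]) h1'' (by simp)
          dsimp only at hrec
          rw [List.foldl_append] at hrec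
          simp only [List.foldl_cons, List.foldl_nil] at hrec
          rw [emit_eq seen h2] at hrec
          rw [show ((s + (pend ++ [ch]).length : Nat) : Int)
              = ((s + pend.length + 1 + ([] : List Char).length : Nat) : Int) by simp; ring]
          rw [show ((s + pend.length : Nat) : Int) + 1 = ((s + pend.length + 1 : Nat) : Int) by
            push_cast; ring]
          rw [hrec]
          conv_rhs => rw [altScan]
          rw [if_neg hb1, if_neg hb2, if_pos hb3]
        · have hstep : csvStep text (items, depth, (s : Int)) (((s + pend.length : Nat) : Int), ch)
              = (items, depth, (s : Int)) := by
            simp only [csvStep]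
            rw [if_neg hb1, if_neg hb2, if_neg (by exact hb3)]
          rw [hstep]
          conv_rhs => rw [altScan]
          rw [if_neg hb1, if_neg hb2, if_neg hb3]
          by_cases hb4 : ch = ':' ∧ seen = false
          · rw [if_pos hb4]
            obtain ⟨hcol, hseen⟩ := hb4
            subst hcol hseen
            obtain ⟨hcur, hnc⟩ : cur.reverse = pend ∧ ':' ∉ pend := by simpa using h2
            refine ih text (pend ++ [':']) [] s depth true items h1' ?_
            simp only [if_pos]
            exact ⟨pend, hnc, by simp⟩
          · rw [if_neg hb4]
            refine ih text (pend ++ [ch]) (ch :: cur) s depth seen items h1' ?_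
            cases seen with
            | true =>
              obtain ⟨pre, hpre, hpend⟩ : ∃ pre, ':' ∉ pre ∧ pend = pre ++ ':' :: cur.reverse := by
                simpa using h2
              simp only [if_pos]
              exact ⟨pre, hpre, by rw [hpend]; simp⟩
            | false =>
              have hch : ch ≠ ':' := by
                intro h; exact hb4 ⟨h, rfl⟩
              obtain ⟨hcur, hnc⟩ : cur.reverse = pend ∧ ':' ∉ pend := by simpa using h2
              simp only [Bool.false_eq_true, if_false]
              constructor
              · rw [List.reverse_cons, hcur]
              · simp [hnc, Ne.symm hch]

theorem ports_agree (portion : String) :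
    normalize_source_signature portion = normalize_source_signature_alt portion := by
  unfold normalize_source_signature normalize_source_signature_alt
  dsimp only
  by_cases h0 : PySem.Chars.strip portion.toList = []
  · rw [if_pos h0, h0]
    have hsw : PySem.Chars.startswith [] ['('] = false := by decide
    simp [hsw]
  · rw [if_neg h0]
    generalize (if (PySem.Chars.startswith (PySem.Chars.strip portion.toList) ['('] &&
          PySem.Chars.endswith (PySem.Chars.strip portion.toList) [')']) = true
        then PySem.Chars.strip (PySem.List.slice (PySem.Chars.strip portion.toList) (some 1) (some (-1)))
        else PySem.Chars.strip portion.toList) = text1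
    by_cases h1 : text1 = []
    · rw [if_pos h1, if_pos h1]
    · rw [if_neg h1, if_neg h1]
      have h := scan_main text1 text1 [] [] 0 0 false [] (by simp) (by simp)
      dsimp only at h
      simp only [List.length_nil, Nat.add_zero, Nat.cast_zero, List.foldl_nil] at h
      unfold splitTopLevelCsv
      exact h

-- ===== VERDICT (by name: the statement is the Claim_ definition above) =====
theorem normalize_source_signature_spec : Claim_equal_normalize_source_signature := by
  intro portion _ _
  unfold Spec_normalize_source_signature
  exact ports_agree portion
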